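-- pv_equiv track=rewrite | github.com/danbert15/programming_coding_challenge_activity | same_functionality_without_using_ljust.py | custom_ljust
-- ===== SOURCE A (Python) =====
-- def custom_ljust(text, total_length):
--     text_length = len(text)
--
--     if text_length >= total_length:
--         return text
--
--     result = text
--
--     while len(result) < total_length:
--         result += " "
--
--     return result
-- ===== SOURCE B (Python) =====
-- def custom_ljust(text, total_length):
--     return text + " " * (total_length - len(text))
-- ===== Notes on version B (the rewrite author's own statement) =====
-- stated objective: simpler
-- what changed: B computes the padding deficit once and builds the pad string with one multiplication, replacing A's guard and append-one-space-per-iteration while loop.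
import Mathlib
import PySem

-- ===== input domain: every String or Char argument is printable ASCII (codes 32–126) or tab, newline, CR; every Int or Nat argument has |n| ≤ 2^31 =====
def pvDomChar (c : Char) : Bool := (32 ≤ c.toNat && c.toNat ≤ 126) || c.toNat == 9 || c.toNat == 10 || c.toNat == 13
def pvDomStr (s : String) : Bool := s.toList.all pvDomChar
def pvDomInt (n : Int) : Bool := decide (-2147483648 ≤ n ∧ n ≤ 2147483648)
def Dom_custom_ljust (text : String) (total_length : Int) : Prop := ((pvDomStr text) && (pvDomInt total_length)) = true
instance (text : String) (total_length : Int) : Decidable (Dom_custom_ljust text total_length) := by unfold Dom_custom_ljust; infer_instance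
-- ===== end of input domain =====

-- B replaces A's append-one-space-per-iteration while loop with a single multiplication of the deficit (simpler, no loop).


-- ===== PORT A =====
-- while len(result) < total_length: result += " "   (appends one space per iteration)
def ljustLoopA (result : List Char) (total_length : Int) : List Char :=
  if (result.length : Int) < total_length then
    ljustLoopA (result ++ [' ']) total_length
  else
    result
  termination_by (total_length - result.length).toNat
  decreasing_by simp; omega

def custom_ljust (text : String) (total_length : Int) : String :=
  let text_length : Int := text.toList.length
  if text_length ≥ total_length then
    text
  else
    String.mk (ljustLoopA text.toList total_length)

-- ===== PORT B =====
-- text + " " * (total_length - len(text)) : one multiplication, no loop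
def custom_ljust_alt (text : String) (total_length : Int) : String :=
  String.mk (text.toList ++ PySem.List.pyRepeat [' '] (total_length - text.toList.length))

-- ===== PRECONDITION & SPEC =====
def Spec_custom_ljust (text : String) (total_length : Int) (out : String) : Prop := out = custom_ljust_alt text total_length
instance (text : String) (total_length : Int) (out : String) : Decidable (Spec_custom_ljust text total_length out) := by unfold Spec_custom_ljust; infer_instance

-- ===== CLAIM (what is proved, stated in full; the proofs are below) =====
def Claim_equal_custom_ljust : Prop := ∀ (text : String) (total_length : Int), Dom_custom_ljust text total_length → Spec_custom_ljust text total_length (custom_ljust text total_length)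

-- ===== LEMMAS AND PROOFS =====

-- ===== VERDICT (by name: the statement is the Claim_ definition above) =====
-- the loop appends exactly (total - len).toNat spaces
theorem ljustLoopA_eq (result : List Char) (total_length : Int) :
    ljustLoopA result total_length
      = result ++ List.replicate (total_length - result.length).toNat ' ' := by
  by_cases h : (result.length : Int) < total_length
  · rw [ljustLoopA, if_pos h, ljustLoopA_eq]
    have : (total_length - ((result ++ [' ']).length : Int)).toNat + 1
        = (total_length - result.length).toNat := by simp; omega
    rw [← this, List.replicate_succ]
    simp
  · rw [ljustLoopA, if_neg h]
    have : (total_length - (result.length : Int)).toNat = 0 := by omega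
    simp [this]
  termination_by (total_length - result.length).toNat
  decreasing_by simp; omega

theorem custom_ljust_spec : Claim_equal_custom_ljust := by
  intro text total_length _
  unfold Spec_custom_ljust custom_ljust custom_ljust_alt
  rw [PySem.List.pyRepeat_singleton]
  by_cases h : (text.toList.length : Int) ≥ total_length
  · have h0 : (total_length - (text.toList.length : Int)).toNat = 0 := by omega
    rw [if_pos h, h0]
    simp [String.mk]
  · rw [if_neg h, ljustLoopA_eq]
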